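-- pv_equiv track=rewrite | github.com/N3XT14/jain_panchang | ml_kit/edge_detect.py | get_coordinates_horizontal
-- ===== SOURCE A (Python) =====
-- def get_coordinates_horizontal(valArray1, valArray2, minVal, maxVal, width, height) -> list:
--     line_coordinates = []
--
--     # Generate coordinates for the top side
--     d = {}
--     for value, count in valArray1:
--         x_values_for_y = [x for x, _ in valArray2 if minVal <= x <= maxVal]
--         for x in x_values_for_y:
--             if x in d: continue
--             line_coordinates.append((x, value))
--             d[x] = 1
--             count -= 1
--             if count == 0:
--                 line_coordinates.append((x + width, value))
--                 break
--
--     d = {}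
--     for value, count in valArray1[::-1]:
--         x_values_for_y = [x for x, _ in valArray2 if minVal <= x <= maxVal]
--         for x in x_values_for_y:
--             if x in d:
--                 continue
--             line_coordinates.append((x, value + height))
--             d[x] = 1
--             count -= 1
--             if count == 0:
--                 line_coordinates.append((x + width, value + height))
--                 break
--     return line_coordinates
-- ===== SOURCE B (Python) =====
-- def get_coordinates_horizontal(valArray1, valArray2, minVal, maxVal, width, height) -> list:
--     # In-range x values, deduplicated in first-occurrence order, computed once.
--     xs = list(dict.fromkeys(x for x, _ in valArray2 if minVal <= x <= maxVal))
--
--     def segments(rows, offset):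
--         # One segment per row: a slice of xs (plus a closing point when the
--         # row's count is met exactly); no per-element rescans.
--         segs = []
--         rest = xs
--         for value, count in rows:
--             if not rest:
--                 break
--             y = value + offset
--             if 1 <= count <= len(rest):
--                 chunk, rest = rest[:count], rest[count:]
--                 segs.append([(x, y) for x in chunk] + [(chunk[-1] + width, y)])
--             else:
--                 segs.append([(x, y) for x in rest])
--                 rest = []
--         return segs
--
--     top = segments(valArray1, 0)
--     bottom = segments(list(reversed(valArray1)), height)
--     return [pt for seg in top for pt in seg] + [pt for seg in bottom for pt in seg]
-- ===== Notes on version B (the rewrite author's own statement) =====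
-- stated objective: faster
-- what changed: B deduplicates the in-range x-list once and then slices it into one chunk per row (take/drop by the row's count), concatenating per-row segments, instead of A's rebuilding the filtered list and rescanning it past a dict of seen x's for every row of valArray1.
import Mathlib
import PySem

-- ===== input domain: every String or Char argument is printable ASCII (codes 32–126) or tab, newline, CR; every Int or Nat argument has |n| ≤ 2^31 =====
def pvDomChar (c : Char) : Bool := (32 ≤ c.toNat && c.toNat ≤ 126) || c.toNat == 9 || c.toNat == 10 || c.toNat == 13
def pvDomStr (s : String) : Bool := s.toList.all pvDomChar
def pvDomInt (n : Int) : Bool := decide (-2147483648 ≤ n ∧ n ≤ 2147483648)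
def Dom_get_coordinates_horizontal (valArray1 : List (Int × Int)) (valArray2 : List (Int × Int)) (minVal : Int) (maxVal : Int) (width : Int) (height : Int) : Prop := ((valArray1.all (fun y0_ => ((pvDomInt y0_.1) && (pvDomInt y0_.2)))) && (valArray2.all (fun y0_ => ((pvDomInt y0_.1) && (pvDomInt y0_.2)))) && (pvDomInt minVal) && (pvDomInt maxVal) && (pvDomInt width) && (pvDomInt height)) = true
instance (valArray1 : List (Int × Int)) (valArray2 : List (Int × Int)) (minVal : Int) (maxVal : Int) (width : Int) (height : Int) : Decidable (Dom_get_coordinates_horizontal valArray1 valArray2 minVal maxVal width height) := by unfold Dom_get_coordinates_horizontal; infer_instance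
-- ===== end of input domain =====

-- B deduplicates the in-range x-list once and slices it into one chunk per row instead of
-- A's per-row rescan of valArray2 with a dict of seen x's (objective: faster).
-- Return-value equivalence; neither implementation mutates its arguments.

-- ===== PORT A =====
-- [x for x, _ in valArray2 if minVal <= x <= maxVal]
def aXVals (valArray2 : List (Int × Int)) (minVal maxVal : Int) : List Int :=
  valArray2.filterMap (fun p => if minVal ≤ p.1 ∧ p.1 ≤ maxVal then some p.1 else none)

-- inner 'for x in x_values_for_y' loop (v is the y-value appended, i.e. value or value+height)
def aInner (width v : Int) : List Int → PySem.Dict Int Int → Int → List (Int × Int) → List (Int × Int) × PySem.Dict Int Int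
  | [], d, _, acc => (acc, d)
  | x :: xs, d, count, acc =>
    if d.contains x then aInner width v xs d count acc
    else
      let acc' := acc ++ [(x, v)]
      let d' := d.insert x 1
      let count' := count - 1
      if count' = 0 then (acc' ++ [(x + width, v)], d')
      else aInner width v xs d' count' acc'

-- one of A's two identical 'for value, count in …' blocks (offset = 0 resp. height)
def aOuter (valArray2 : List (Int × Int)) (minVal maxVal width offset : Int) : List (Int × Int) → PySem.Dict Int Int → List (Int × Int) → List (Int × Int)
  | [], _, acc => acc
  | (value, count) :: rows, d, acc =>
    let r := aInner width (value + offset) (aXVals valArray2 minVal maxVal) d count acc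
    aOuter valArray2 minVal maxVal width offset rows r.2 r.1

def get_coordinates_horizontal (valArray1 : List (Int × Int)) (valArray2 : List (Int × Int)) (minVal : Int) (maxVal : Int) (width : Int) (height : Int) : List (Int × Int) :=
  let p1 := aOuter valArray2 minVal maxVal width 0 valArray1 PySem.Dict.empty []
  aOuter valArray2 minVal maxVal width height ((PySem.List.slice? valArray1 none none (-1)).getD []) PySem.Dict.empty p1

-- ===== PORT B =====
-- xs = list(dict.fromkeys(x for x, _ in valArray2 if minVal <= x <= maxVal))
def bXs (valArray2 : List (Int × Int)) (minVal maxVal : Int) : List Int :=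
  PySem.List.dedup (valArray2.filterMap (fun p => if minVal ≤ p.1 ∧ p.1 ≤ maxVal then some p.1 else none))

-- segments(rows, offset): one segment per row, a slice of the remaining xs.
-- rest[:count] / rest[count:] are ported as take/drop — exact here since the guard gives 1 ≤ count ≤ len(rest);
-- chunk[-1] is ported as PySem.List.pyGet? chunk (-1) (chunk is nonempty under the guard, so .getD 0 is never used).
def bPass (width offset : Int) : List (Int × Int) → List Int → List (List (Int × Int))
  | [], _ => []
  | (value, count) :: rows, rest =>
    if rest = [] then []
    else
      let y := value + offset
      if 1 ≤ count ∧ count ≤ (rest.length : Int) then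
        let chunk := rest.take count.toNat
        (chunk.map (fun x => (x, y)) ++ [((PySem.List.pyGet? chunk (-1)).getD 0 + width, y)]) ::
          bPass width offset rows (rest.drop count.toNat)
      else
        (rest.map (fun x => (x, y))) :: bPass width offset rows []

def get_coordinates_horizontal_alt (valArray1 : List (Int × Int)) (valArray2 : List (Int × Int)) (minVal : Int) (maxVal : Int) (width : Int) (height : Int) : List (Int × Int) :=
  let xs := bXs valArray2 minVal maxVal
  (bPass width 0 valArray1 xs).flatten ++ (bPass width height valArray1.reverse xs).flatten

-- ===== PRECONDITION & SPEC =====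
def Spec_get_coordinates_horizontal (valArray1 : List (Int × Int)) (valArray2 : List (Int × Int)) (minVal : Int) (maxVal : Int) (width : Int) (height : Int) (out : List (Int × Int)) : Prop := out = get_coordinates_horizontal_alt valArray1 valArray2 minVal maxVal width height
instance (valArray1 : List (Int × Int)) (valArray2 : List (Int × Int)) (minVal : Int) (maxVal : Int) (width : Int) (height : Int) (out : List (Int × Int)) : Decidable (Spec_get_coordinates_horizontal valArray1 valArray2 minVal maxVal width height out) := by unfold Spec_get_coordinates_horizontal; infer_instance

-- ===== CLAIM (what is proved, stated in full; the proofs are below) =====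
def Claim_equal_get_coordinates_horizontal : Prop := ∀ (valArray1 : List (Int × Int)) (valArray2 : List (Int × Int)) (minVal : Int) (maxVal : Int) (width : Int) (height : Int), Dom_get_coordinates_horizontal valArray1 valArray2 minVal maxVal width height → Spec_get_coordinates_horizontal valArray1 valArray2 minVal maxVal width height (get_coordinates_horizontal valArray1 valArray2 minVal maxVal width height)

-- ===== LEMMAS AND PROOFS =====

-- proof-side model of "the in-range x's not yet seen, deduplicated, in order"
def remAfter (seen : List Int) : List Int → List Int
  | [] => []
  | x :: xs => if x ∈ seen then remAfter seen xs else x :: remAfter (x :: seen) xs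

-- proof-side pointer formulation of one row (consumes from xs)
def bInner (width v : Int) : List Int → Int → List (Int × Int) → List (Int × Int) × List Int
  | [], _, acc => (acc, [])
  | x :: xs, count, acc =>
    let acc' := acc ++ [(x, v)]
    let count' := count - 1
    if count' = 0 then (acc' ++ [(x + width, v)], xs)
    else bInner width v xs count' acc'

-- proof-side pointer formulation of one pass
def bOuter (width offset : Int) : List (Int × Int) → List Int → List (Int × Int) → List (Int × Int)
  | [], _, acc => acc
  | (value, count) :: rows, xs, acc =>
    if xs.isEmpty then acc
    else
      let r := bInner width (value + offset) xs count acc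
      bOuter width offset rows r.2 r.1

theorem remAfter_congr (xs : List Int) : ∀ s s' : List Int, (∀ y, y ∈ s ↔ y ∈ s') → remAfter s xs = remAfter s' xs := by
  induction xs with
  | nil => intro s s' _; rfl
  | cons x xs ih =>
    intro s s' h
    simp only [remAfter]
    by_cases hx : x ∈ s
    · rw [if_pos hx, if_pos ((h x).1 hx)]; exact ih s s' h
    · rw [if_neg hx, if_neg (fun hx' => hx ((h x).2 hx'))]
      congr 1
      exact ih (x :: s) (x :: s') (by intro y; simp [h y])

theorem remAfter_split (xs : List Int) : ∀ (s p q s' : List Int), remAfter s xs = p ++ q → (∀ y, y ∈ s' ↔ y ∈ p ∨ y ∈ s) → remAfter s' xs = q := by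
  induction xs with
  | nil =>
    intro s p q s' h h'
    simp only [remAfter] at h ⊢
    rcases List.append_eq_nil_iff.mp h.symm with ⟨_, hq⟩
    exact hq.symm
  | cons x xs ih =>
    intro s p q s' h h'
    simp only [remAfter] at h ⊢
    by_cases hx : x ∈ s
    · rw [if_pos hx] at h
      rw [if_pos ((h' x).2 (Or.inr hx))]
      exact ih s p q s' h h'
    · rw [if_neg hx] at h
      cases p with
      | nil =>
        simp only [List.nil_append] at h ⊢
        have hx' : x ∉ s' := fun hm => by
          rcases (h' x).1 hm with h1 | h1
          · exact absurd h1 (List.not_mem_nil)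
          · exact hx h1
        rw [if_neg hx', ← h]
        congr 1
        exact remAfter_congr xs (x :: s') (x :: s) (by intro y; simp [h' y])
      | cons p0 p =>
        simp only [List.cons_append, List.cons.injEq] at h
        obtain ⟨rfl, h2⟩ := h
        rw [if_pos ((h' x).2 (Or.inl (by simp)))]
        exact ih (x :: s) p q s' h2 (by intro y; simp [h' y]; tauto)

theorem bOuter_nil_xs (width offset : Int) (rows : List (Int × Int)) (acc : List (Int × Int)) :
    bOuter width offset rows [] acc = acc := by
  cases rows with
  | nil => rfl
  | cons r rows => cases r; simp [bOuter]

theorem inner_eq (width v : Int) (xs : List Int) : ∀ (d : PySem.Dict Int Int) (seen : List Int) (count : Int) (acc : List (Int × Int)),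
    (∀ y, d.contains y = decide (y ∈ seen)) →
    (aInner width v xs d count acc).1 = (bInner width v (remAfter seen xs) count acc).1 ∧
    ∃ p, remAfter seen xs = p ++ (bInner width v (remAfter seen xs) count acc).2 ∧
      (∀ y, (aInner width v xs d count acc).2.contains y = decide (y ∈ p ∨ y ∈ seen)) := by
  induction xs with
  | nil =>
    intro d seen count acc hd
    refine ⟨rfl, [], rfl, ?_⟩
    intro y; simp [aInner, hd y]
  | cons x xs ih =>
    intro d seen count acc hd
    simp only [aInner, remAfter]
    by_cases hx : x ∈ seen
    · rw [if_pos hx]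
      have : d.contains x = true := by rw [hd x]; simp [hx]
      rw [if_pos this]
      exact ih d seen count acc hd
    · have hcx : d.contains x = false := by rw [hd x]; simp [hx]
      rw [if_neg hx, hcx]
      simp only [Bool.false_eq_true, if_false, bInner]
      by_cases hc : count - 1 = 0
      · rw [if_pos hc, if_pos hc]
        refine ⟨rfl, [x], rfl, ?_⟩
        intro y
        rw [PySem.Dict.contains_insert, hd y]
        by_cases hyx : y = x <;> simp [hyx]
      · rw [if_neg hc, if_neg hc]
        have hd' : ∀ y, (d.insert x 1).contains y = decide (y ∈ x :: seen) := by
          intro y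
          rw [PySem.Dict.contains_insert, hd y]
          by_cases hyx : y = x <;> simp [hyx]
        obtain ⟨h1, p, hsplit, hmem⟩ := ih (d.insert x 1) (x :: seen) (count - 1) (acc ++ [(x, v)]) hd'
        refine ⟨h1, x :: p, by rw [List.cons_append, ← hsplit], ?_⟩
        intro y
        rw [hmem y]
        by_cases hyx : y = x <;> simp [hyx]

theorem outer_eq (valArray2 : List (Int × Int)) (minVal maxVal width offset : Int) (rows : List (Int × Int)) :
    ∀ (d : PySem.Dict Int Int) (seen : List Int) (acc : List (Int × Int)),
    (∀ y, d.contains y = decide (y ∈ seen)) →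
    aOuter valArray2 minVal maxVal width offset rows d acc
      = bOuter width offset rows (remAfter seen (aXVals valArray2 minVal maxVal)) acc := by
  induction rows with
  | nil => intro d seen acc _; rfl
  | cons r rows ih =>
    intro d seen acc hd
    obtain ⟨value, count⟩ := r
    simp only [aOuter, bOuter]
    obtain ⟨h1, p, hsplit, hmem⟩ := inner_eq width (value + offset) (aXVals valArray2 minVal maxVal) d seen count acc hd
    have hrem : remAfter (p ++ seen) (aXVals valArray2 minVal maxVal)
        = (bInner width (value + offset) (remAfter seen (aXVals valArray2 minVal maxVal)) count acc).2 := by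
      exact remAfter_split _ seen p _ (p ++ seen) hsplit (by intro y; simp)
    have hmem' : ∀ y, (aInner width (value + offset) (aXVals valArray2 minVal maxVal) d count acc).2.contains y
        = decide (y ∈ p ++ seen) := by
      intro y; rw [hmem y]; simp
    by_cases he : remAfter seen (aXVals valArray2 minVal maxVal) = []
    · rw [he] at h1 hsplit hrem ⊢
      simp only [List.isEmpty_nil, if_true]
      have hp : p = [] := by
        cases p with
        | nil => rfl
        | cons a b => simp at hsplit
      subst hp
      simp only [bInner] at h1 hrem
      rw [ih _ (([] : List Int) ++ seen) _ (by simpa using hmem'), hrem, h1]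
      exact bOuter_nil_xs width offset rows acc
    · rw [if_neg (by simpa [List.isEmpty_iff] using he)]
      rw [ih _ (p ++ seen) _ hmem', hrem, h1]

-- the dedup in B is exactly remAfter from the empty seen-list
theorem foldl_add_eq_append_remAfter : ∀ (l s : List Int), List.foldl PySem.Set.add s l = s ++ remAfter s l := by
  intro l
  induction l with
  | nil => intro s; simp [remAfter]
  | cons x xs ih =>
    intro s
    simp only [List.foldl_cons, remAfter]
    by_cases hx : x ∈ s
    · rw [if_pos hx, PySem.Set.add_of_mem hx, ih s]
    · rw [if_neg hx, PySem.Set.add_of_not_mem hx, ih (s ++ [x])]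
      rw [remAfter_congr xs (s ++ [x]) (x :: s) (by intro y; simp; tauto)]
      simp

theorem bXs_eq_remAfter (valArray2 : List (Int × Int)) (minVal maxVal : Int) :
    bXs valArray2 minVal maxVal = remAfter [] (aXVals valArray2 minVal maxVal) := by
  show PySem.List.dedup (aXVals valArray2 minVal maxVal) = _
  rw [PySem.List.dedup_eq_ofList, PySem.Set.ofList_eq_foldl]
  simpa using foldl_add_eq_append_remAfter (aXVals valArray2 minVal maxVal) []

-- closed form of one pointer-row
theorem bInner_closed (width v : Int) : ∀ (r : List Int) (count : Int) (acc : List (Int × Int)),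
    bInner width v r count acc =
      (acc ++ (if 1 ≤ count ∧ count ≤ (r.length : Int)
               then (r.take count.toNat).map (fun x => (x, v)) ++ [((PySem.List.pyGet? (r.take count.toNat) (-1)).getD 0 + width, v)]
               else r.map (fun x => (x, v))),
       if 1 ≤ count ∧ count ≤ (r.length : Int) then r.drop count.toNat else []) := by
  intro r
  induction r with
  | nil =>
    intro count acc
    have h : ¬(1 ≤ count ∧ count ≤ (([] : List Int).length : Int)) := by simp; omega
    simp only [bInner, if_neg h]
    simp
  | cons x xs ih =>
    intro count acc
    simp only [bInner]
    by_cases hc : count - 1 = 0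
    · have hcv : count = 1 := by omega
      subst hcv
      have hC : 1 ≤ (1 : Int) ∧ (1 : Int) ≤ ((x :: xs).length : Int) := by
        constructor
        · omega
        · simp only [List.length_cons]; push_cast; omega
      rw [if_pos hc, if_pos hC, if_pos hC]
      simp [PySem.List.pyGet?_neg_one, Int.toNat_one]
    · rw [if_neg hc, ih (count - 1) (acc ++ [(x, v)])]
      by_cases hC : 1 ≤ count ∧ count ≤ ((x :: xs).length : Int)
      · have hC' : 1 ≤ count - 1 ∧ count - 1 ≤ (xs.length : Int) := by
          simp [List.length_cons] at hC ⊢; omega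
        have htn : count.toNat = (count - 1).toNat + 1 := by omega
        have htake : (x :: xs).take count.toNat = x :: xs.take (count - 1).toNat := by
          rw [htn, List.take_succ_cons]
        have hdrop : (x :: xs).drop count.toNat = xs.drop (count - 1).toNat := by
          rw [htn, List.drop_succ_cons]
        rw [if_pos hC', if_pos hC', if_pos hC, if_pos hC, htake, hdrop]
        have hne : xs.take (count - 1).toNat ≠ [] := by
          have h2 : xs ≠ [] := by
            intro h; rw [h] at hC'; simp at hC'; omega
          simp [List.take_eq_nil_iff, h2]; omega
        obtain ⟨y, t, hyt⟩ := List.exists_cons_of_ne_nil hne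
        rw [PySem.List.pyGet?_neg_one, PySem.List.pyGet?_neg_one, hyt,
          List.getLast?_cons_cons]
        simp
      · have hC' : ¬(1 ≤ count - 1 ∧ count - 1 ≤ (xs.length : Int)) := by
          simp [List.length_cons] at hC ⊢; intro h1; omega
        rw [if_neg hC', if_neg hC', if_neg hC, if_neg hC]
        simp

theorem bPass_nil (width offset : Int) (rows : List (Int × Int)) : bPass width offset rows [] = [] := by
  cases rows with
  | nil => rfl
  | cons r rows => cases r; simp [bPass]

theorem bOuter_eq_flatten (width offset : Int) : ∀ (rows : List (Int × Int)) (rest : List Int) (acc : List (Int × Int)),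
    bOuter width offset rows rest acc = acc ++ (bPass width offset rows rest).flatten := by
  intro rows
  induction rows with
  | nil => intro rest acc; simp [bOuter, bPass]
  | cons r rows ih =>
    intro rest acc
    obtain ⟨value, count⟩ := r
    by_cases he : rest = []
    · subst he; simp [bOuter, bPass]
    · simp only [bOuter, bPass, if_neg he]
      rw [if_neg (by simpa [List.isEmpty_iff] using he)]
      rw [bInner_closed]
      by_cases hC : 1 ≤ count ∧ count ≤ (rest.length : Int)
      · simp only [if_pos hC]
        rw [ih]
        simp
      · simp only [if_neg hC]
        rw [bOuter_nil_xs, bPass_nil]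
        simp

theorem get_coordinates_horizontal_spec : Claim_equal_get_coordinates_horizontal := by
  intro valArray1 valArray2 minVal maxVal width height _
  unfold Spec_get_coordinates_horizontal get_coordinates_horizontal get_coordinates_horizontal_alt
  have hempty : ∀ y : Int, (PySem.Dict.empty : PySem.Dict Int Int).contains y = decide (y ∈ ([] : List Int)) := by
    intro y; simp [PySem.Dict.contains_empty]
  rw [PySem.List.slice?_none_none_neg_one]
  simp only [Option.getD_some]
  rw [outer_eq valArray2 minVal maxVal width 0 valArray1 PySem.Dict.empty [] [] hempty]
  rw [outer_eq valArray2 minVal maxVal width height valArray1.reverse PySem.Dict.empty [] _ hempty]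
  rw [bOuter_eq_flatten, bOuter_eq_flatten, bXs_eq_remAfter]
  simp
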